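-- pv_equiv track=rewrite | github.com/KJSui/leetcode-2020 | bloombergNewquesiton.py | deepestString
-- ===== SOURCE A (Python) =====
-- def deepestString(s):
--     res = ""
--     level = 0
--     start = 0
--     maxlevel = 0
--     while start < len(s):
--         if s[start] == '(':
--             level += 1
--             if maxlevel <= level:
--                 maxlevel = level
--                 res = ""
--         elif s[start] == ')':
--             level -= 1
--         else:
--             if level == maxlevel:
--                 res += s[start]
--         start += 1
--
--     return res
-- ===== SOURCE B (Python) =====
-- def deepestString(s):
--     # pass 1: compute the maximum nesting level ever reached (at least 0)
--     level = 0
--     maxdepth = 0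
--     for c in s:
--         if c == '(':
--             level += 1
--             if level > maxdepth:
--                 maxdepth = level
--         elif c == ')':
--             level -= 1
--     # pass 2: collect chars at maxdepth, resetting when a '(' reaches maxdepth
--     level = 0
--     res = []
--     for c in s:
--         if c == '(':
--             level += 1
--             if level == maxdepth:
--                 res = []
--         elif c == ')':
--             level -= 1
--         elif level == maxdepth:
--             res.append(c)
--     return ''.join(res)
-- ===== Notes on version B (the rewrite author's own statement) =====
-- stated objective: faster
-- what changed: Replaces A's single online pass (which guesses the max depth on the fly, resets speculatively, and grows the result by repeated string concatenation) with an explicit two-pass structure: first compute the maximum nesting level, then collect the last run at that level into a list joined once.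
import Mathlib
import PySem

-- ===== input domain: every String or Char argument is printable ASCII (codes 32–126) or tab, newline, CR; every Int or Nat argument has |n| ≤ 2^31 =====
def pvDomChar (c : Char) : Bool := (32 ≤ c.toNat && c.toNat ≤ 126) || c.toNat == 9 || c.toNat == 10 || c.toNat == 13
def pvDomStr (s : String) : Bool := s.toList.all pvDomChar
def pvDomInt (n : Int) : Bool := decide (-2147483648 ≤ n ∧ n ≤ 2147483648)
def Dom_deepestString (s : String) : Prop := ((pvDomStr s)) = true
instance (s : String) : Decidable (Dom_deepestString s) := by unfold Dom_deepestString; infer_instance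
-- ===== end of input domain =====

-- B: explicit two-pass re-implementation (compute max depth, then collect) of A's single online pass, avoiding A's repeated string concatenation; equivalence is total (no Pre_).

-- ===== PORT A =====
-- A's while loop over s[start], state (res, level, maxlevel); res kept as List Char, String.mk at the end
def aLoop : List Char → List Char → Int → Int → List Char
  | [], res, _, _ => res
  | c :: rest, res, level, maxlevel =>
    if c = '(' then
      if maxlevel ≤ level + 1 then aLoop rest [] (level + 1) (level + 1)
      else aLoop rest res (level + 1) maxlevel
    else if c = ')' then aLoop rest res (level - 1) maxlevel
    else if level = maxlevel then aLoop rest (res ++ [c]) level maxlevel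
    else aLoop rest res level maxlevel

def deepestString (s : String) : String := String.mk (aLoop s.toList [] 0 0)

-- ===== PORT B =====
-- pass 1: maximum running nesting level
def maxPass : List Char → Int → Int → Int
  | [], _, m => m
  | c :: rest, level, m =>
    if c = '(' then
      if level + 1 > m then maxPass rest (level + 1) (level + 1)
      else maxPass rest (level + 1) m
    else if c = ')' then maxPass rest (level - 1) m
    else maxPass rest level m

-- pass 2: collect chars at maxdepth, resetting on a '(' that reaches maxdepth
def bLoop : List Char → Int → Int → List Char → List Char
  | [], _, _, res => res
  | c :: rest, level, M, res =>
    if c = '(' then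
      if level + 1 = M then bLoop rest (level + 1) M []
      else bLoop rest (level + 1) M res
    else if c = ')' then bLoop rest (level - 1) M res
    else if level = M then bLoop rest level M (res ++ [c])
    else bLoop rest level M res

def deepestString_alt (s : String) : String :=
  String.mk (bLoop s.toList 0 (maxPass s.toList 0 0) [])

-- ===== PRECONDITION & SPEC =====
def Spec_deepestString (s : String) (out : String) : Prop := out = deepestString_alt s
instance (s : String) (out : String) : Decidable (Spec_deepestString s out) := by unfold Spec_deepestString; infer_instance

-- ===== CLAIM (what is proved, stated in full; the proofs are below) =====
def Claim_equal_deepestString : Prop := ∀ (s : String), Dom_deepestString s → Spec_deepestString s (deepestString s)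

-- ===== LEMMAS AND PROOFS =====

-- the running maximum never decreases
theorem maxPass_mono : ∀ (l : List Char) (lv m : Int), m ≤ maxPass l lv m := by
  intro l
  induction l with
  | nil => intro lv m; simp [maxPass]
  | cons c rest ih =>
    intro lv m
    simp only [maxPass]
    split_ifs with h1 h2 h3
    · exact le_trans (by omega) (ih _ _)
    · exact ih _ _
    · exact ih _ _
    · exact ih _ _

-- if the suffix never exceeds the current max, A and B (with M = that max) run in lockstep
theorem lockstep : ∀ (l : List Char) (lv m : Int) (res : List Char),
    maxPass l lv m = m → aLoop l res lv m = bLoop l lv m res := by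
  intro l
  induction l with
  | nil => intro lv m res _; simp [aLoop, bLoop]
  | cons c rest ih =>
    intro lv m res hM
    by_cases hc : c = '('
    · subst hc
      simp only [maxPass, reduceIte] at hM
      simp only [aLoop, bLoop, reduceIte]
      have hle : ¬ (lv + 1 > m) := by
        intro hgt
        rw [if_pos hgt] at hM
        have := maxPass_mono rest (lv + 1) (lv + 1)
        omega
      rw [if_neg hle] at hM
      by_cases heq : lv + 1 = m
      · subst heq
        rw [if_pos (le_refl (lv + 1)), if_pos rfl]
        exact ih _ _ _ hM
      · rw [if_neg (show ¬ m ≤ lv + 1 by omega), if_neg heq]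
        exact ih _ _ _ hM
    · by_cases hc2 : c = ')'
      · subst hc2
        simp only [maxPass, reduceIte] at hM
        simp only [aLoop, bLoop, reduceIte]
        exact ih _ _ _ hM
      · simp only [maxPass, if_neg hc, if_neg hc2] at hM
        simp only [aLoop, bLoop, if_neg hc, if_neg hc2]
        by_cases he : lv = m
        · rw [if_pos he, if_pos he]; exact ih _ _ _ hM
        · rw [if_neg he, if_neg he]; exact ih _ _ _ hM

-- if the suffix still exceeds the current max, both sides will reset, so both accumulators are irrelevant
theorem catchup : ∀ (l : List Char) (lv m : Int) (res res' : List Char),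
    maxPass l lv m ≠ m → aLoop l res lv m = bLoop l lv (maxPass l lv m) res' := by
  intro l
  induction l with
  | nil => intro lv m res res' h; simp [maxPass] at h
  | cons c rest ih =>
    intro lv m res res' hM
    by_cases hc : c = '('
    · subst hc
      simp only [maxPass, reduceIte] at hM ⊢
      simp only [aLoop, bLoop, reduceIte]
      by_cases hgt : lv + 1 > m
      · rw [if_pos hgt] at hM ⊢
        rw [if_pos (show m ≤ lv + 1 by omega)]
        by_cases hfin : maxPass rest (lv + 1) (lv + 1) = lv + 1
        · rw [hfin, if_pos rfl]
          exact lockstep rest (lv + 1) (lv + 1) [] hfin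
        · rw [if_neg (show ¬ lv + 1 = maxPass rest (lv + 1) (lv + 1) from fun h => hfin h.symm)]
          exact ih _ _ _ _ hfin
      · rw [if_neg hgt] at hM ⊢
        have hmono := maxPass_mono rest (lv + 1) m
        by_cases heq : lv + 1 = m
        · subst heq
          rw [if_pos (le_refl (lv + 1)),
              if_neg (show ¬ lv + 1 = maxPass rest (lv + 1) (lv + 1) by omega)]
          exact ih _ _ _ _ hM
        · rw [if_neg (show ¬ m ≤ lv + 1 by omega),
              if_neg (show ¬ lv + 1 = maxPass rest (lv + 1) m by omega)]
          exact ih _ _ _ _ hM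
    · by_cases hc2 : c = ')'
      · subst hc2
        simp only [maxPass, reduceIte] at hM ⊢
        simp only [aLoop, bLoop, reduceIte]
        exact ih _ _ _ _ hM
      · simp only [maxPass, if_neg hc, if_neg hc2] at hM ⊢
        simp only [aLoop, bLoop, if_neg hc, if_neg hc2]
        have hmono := maxPass_mono rest lv m
        by_cases he : lv = m
        · rw [if_pos he, if_neg (show ¬ lv = maxPass rest lv m by omega)]
          exact ih _ _ _ _ hM
        · rw [if_neg he]
          by_cases he2 : lv = maxPass rest lv m
          · rw [if_pos he2]; exact ih _ _ _ _ hM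
          · rw [if_neg he2]; exact ih _ _ _ _ hM

-- ===== VERDICT (by name: the statement is the Claim_ definition above) =====
theorem deepestString_spec : Claim_equal_deepestString := by
  intro s _
  unfold Spec_deepestString deepestString deepestString_alt
  congr 1
  by_cases h : maxPass s.toList 0 0 = 0
  · rw [h]; exact lockstep s.toList 0 0 [] h
  · exact catchup s.toList 0 0 [] [] h
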